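-- pv_equiv track=rewrite | github.com/rawrex/srs.nvim | hooks_runtime/index.py | split_note_into_cards
-- ===== SOURCE A (Python) =====
-- from typing import Dict, List, Set, Tuple
--
-- def split_note_into_cards(note_text: str) -> List[Tuple[int, str]]:
--     cards: List[Tuple[int, str]] = []
--     lines = note_text.splitlines(keepends=True)
--     line_count = len(lines)
--     idx = 0
--
--     while idx < line_count:
--         line = lines[idx]
--         if not line.strip():
--             idx += 1
--             continue
--
--         start_idx = idx
--         base_indent = _indent_width(line)
--         idx += 1
--
--         while idx < line_count:
--             next_line = lines[idx]
--             if not next_line.strip() or _indent_width(next_line) <= base_indent: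
--                 break
--             idx += 1
--
--         block_text = "".join(lines[start_idx:idx])
--         cards.append((start_idx + 1, block_text))
--
--     return cards
--
-- def _indent_width(line: str) -> int:
--     width = 0
--     for char in line:
--         if char in (" ", "\t"):
--             width += 1
--             continue
--         break
--     return width
-- ===== SOURCE B (Python) =====
-- from typing import List, Tuple
--
-- def split_note_into_cards(note_text: str) -> List[Tuple[int, str]]:
--     cards: List[Tuple[int, str]] = []
--     cur = None  # open block: (start_idx, base_indent, buffered lines)
--     for i, line in enumerate(note_text.splitlines(keepends=True)):
--         blank = not line.strip()
--         if cur is not None and (blank or _indent_width(line) <= cur[1]):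
--             start, _, buf = cur
--             cards.append((start + 1, "".join(buf)))
--             cur = None
--         if cur is None:
--             if not blank:
--                 cur = (i, _indent_width(line), [line])
--         else:
--             cur[2].append(line)
--     if cur is not None:
--         start, _, buf = cur
--         cards.append((start + 1, "".join(buf)))
--     return cards
--
-- def _indent_width(line: str) -> int:
--     width = 0
--     for char in line:
--         if char in (" ", "\t"):
--             width += 1
--             continue
--         break
--     return width
-- ===== Notes on version B (the rewrite author's own statement) =====
-- stated objective: alternative
-- what changed: Replaces A's nested index-driven while loops (outer card scan plus inner lookahead with slicing) by a single pass over enumerate(lines) that keeps an optional open-block state (start, base indent, line buffer) and flushes it when a blank or de-indented line is reached.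
import Mathlib
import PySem

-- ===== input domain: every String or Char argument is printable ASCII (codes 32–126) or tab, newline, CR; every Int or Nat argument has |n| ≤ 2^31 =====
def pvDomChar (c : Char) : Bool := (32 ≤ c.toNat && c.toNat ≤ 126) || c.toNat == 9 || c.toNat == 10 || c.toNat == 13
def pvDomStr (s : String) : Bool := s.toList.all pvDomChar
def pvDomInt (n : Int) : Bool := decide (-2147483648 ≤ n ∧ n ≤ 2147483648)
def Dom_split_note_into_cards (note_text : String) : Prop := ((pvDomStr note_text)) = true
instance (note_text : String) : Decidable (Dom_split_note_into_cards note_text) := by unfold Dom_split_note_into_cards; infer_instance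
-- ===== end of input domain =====

-- B replaces A's nested index-driven while loops by a single enumerated pass with an
-- optional open-block state (same return value; objective: alternative decomposition).

-- shared helpers: both Pythons call str.splitlines(keepends=True) and _indent_width

-- hand port of str.splitlines(keepends=True); exact on the domain, whose only
-- line-break characters are '\n', '\r' and the pair '\r\n'
def pvSlkGo (cur : List Char) : List Char → List (List Char)
  | [] => if cur.isEmpty then [] else [cur.reverse]
  | '\r' :: '\n' :: rest => (cur.reverse ++ ['\r', '\n']) :: pvSlkGo [] rest
  | '\r' :: rest => (cur.reverse ++ ['\r']) :: pvSlkGo [] rest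
  | '\n' :: rest => (cur.reverse ++ ['\n']) :: pvSlkGo [] rest
  | c :: rest => pvSlkGo (c :: cur) rest

def pvSplitlinesKeep (s : String) : List (List Char) := pvSlkGo [] s.toList

-- _indent_width: count leading ' '/'\t' characters (break at the first other char)
def pvIwGo (cs : List Char) (width : Int) : Int :=
  match cs with
  | [] => width
  | c :: rest => if c = ' ' ∨ c = '\t' then pvIwGo rest (width + 1) else width

def pvIndentWidth (line : List Char) : Int := pvIwGo line 0

-- `not line.strip()`
def pvBlank (line : List Char) : Bool := (PySem.Chars.strip line).isEmpty

-- ===== PORT A =====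

-- inner while loop of A: advance idx while the line is non-blank and indented deeper
def innerA (lines : List (List Char)) (base : Int) (idx : Nat) : Nat :=
  if h : idx < lines.length then
    let nl := lines[idx]
    if pvBlank nl || pvIndentWidth nl ≤ base then idx
    else innerA lines base (idx + 1)
  else idx
termination_by lines.length - idx

theorem le_innerA (lines : List (List Char)) (base : Int) (idx : Nat) :
    idx ≤ innerA lines base idx := by
  rw [innerA]
  split
  · show idx ≤ if pvBlank _ || pvIndentWidth _ ≤ base then idx else innerA lines base (idx + 1)
    split
    · exact le_refl _
    · have := le_innerA lines base (idx + 1)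
      omega
  · exact le_refl _
termination_by lines.length - idx

-- outer while loop of A
def outerA (lines : List (List Char)) (idx : Nat) (cards : List (Int × String)) :
    List (Int × String) :=
  if h : idx < lines.length then
    let line := lines[idx]
    if pvBlank line then outerA lines (idx + 1) cards
    else
      let base := pvIndentWidth line
      let idx2 := innerA lines base (idx + 1)
      outerA lines idx2
        (cards ++ [((idx : Int) + 1,
          String.ofList (PySem.List.slice lines (some (idx : Int)) (some (idx2 : Int))).flatten)])
  else cards
termination_by lines.length - idx
decreasing_by
  · omega
  · have := le_innerA lines (pvIndentWidth lines[idx]) (idx + 1)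
    omega

def split_note_into_cards (note_text : String) : List (Int × String) :=
  outerA (pvSplitlinesKeep note_text) 0 []

-- ===== PORT B =====

-- one iteration of B's single for-loop; state = (cards, open block (start, base, buffer))
def stepB (s : List (Int × String) × Option (Int × Int × List (List Char)))
    (p : Int × List Char) :
    List (Int × String) × Option (Int × Int × List (List Char)) :=
  let i := p.1
  let line := p.2
  let bl := pvBlank line
  let s' :=
    match s with
    | (cards, some (st, base, buf)) =>
        if bl || pvIndentWidth line ≤ base then
          (cards ++ [(st + 1, String.ofList buf.flatten)],
            (none : Option (Int × Int × List (List Char))))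
        else (cards, some (st, base, buf))
    | (cards, none) => (cards, none)
  match s' with
  | (cards, none) => if bl then (cards, none) else (cards, some (i, pvIndentWidth line, [line]))
  | (cards, some (st, base, buf)) => (cards, some (st, base, buf ++ [line]))

-- final flush after the loop
def flushB (s : List (Int × String) × Option (Int × Int × List (List Char))) :
    List (Int × String) :=
  match s with
  | (cards, none) => cards
  | (cards, some (st, _, buf)) => cards ++ [(st + 1, String.ofList buf.flatten)]

def split_note_into_cards_alt (note_text : String) : List (Int × String) :=
  flushB ((PySem.List.enumerate (pvSplitlinesKeep note_text)).foldl stepB ([], none))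

-- ===== PRECONDITION & SPEC =====
def Spec_split_note_into_cards (note_text : String) (out : List (Int × String)) : Prop := out = split_note_into_cards_alt note_text
instance (note_text : String) (out : List (Int × String)) : Decidable (Spec_split_note_into_cards note_text out) := by unfold Spec_split_note_into_cards; infer_instance

-- ===== CLAIM (what is proved, stated in full; the proofs are below) =====
def Claim_equal_split_note_into_cards : Prop := ∀ (note_text : String), Dom_split_note_into_cards note_text → Spec_split_note_into_cards note_text (split_note_into_cards note_text)

-- ===== LEMMAS AND PROOFS =====

theorem enum_drop_cons (L : List (List Char)) (j : Nat) (h : j < L.length) :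
    PySem.List.enumerate (L.drop j) (j : Int) =
      ((j : Int), L[j]) :: PySem.List.enumerate (L.drop (j + 1)) ((j : Int) + 1) := by
  conv_lhs => rw [← List.getElem_cons_drop h]
  rw [PySem.List.enumerate_cons]

theorem take_drop_cons (L : List (List Char)) (j m : Nat) (hj : j < L.length) :
    List.take (m + 1) (List.drop j L) = L[j] :: List.take m (List.drop (j + 1) L) := by
  conv_lhs => rw [← List.getElem_cons_drop hj]
  rw [List.take_succ_cons]

theorem inner_run (L : List (List Char)) (base st : Int) (n : Nat) :
    ∀ j buf cards, L.length - j ≤ n →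
      flushB (List.foldl stepB (cards, some (st, base, buf))
          (PySem.List.enumerate (L.drop j) (j : Int))) =
      flushB (List.foldl stepB
          (cards ++ [(st + 1,
            String.ofList (buf ++ (L.drop j).take (innerA L base j - j)).flatten)], none)
          (PySem.List.enumerate (L.drop (innerA L base j)) ((innerA L base j : Nat) : Int))) := by
  induction n with
  | zero =>
      intro j buf cards hn
      have hj : L.length ≤ j := by omega
      rw [innerA]
      simp [List.drop_eq_nil_of_le hj, flushB, hj.not_gt]
  | succ n ih =>
      intro j buf cards hn
      by_cases hj : j < L.length
      · by_cases hstop : (pvBlank L[j] || decide (pvIndentWidth L[j] ≤ base)) = true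
        · -- the stopping line flushes the block and is then re-examined with no open block
          have hinner : innerA L base j = j := by rw [innerA]; simp [hj, hstop]
          rw [hinner]
          have hstep : stepB (cards, some (st, base, buf)) ((j : Int), L[j]) =
              stepB (cards ++ [(st + 1, String.ofList buf.flatten)], none) ((j : Int), L[j]) := by
            simp [stepB, hstop]
          rw [enum_drop_cons L j hj, List.foldl_cons, hstep, Nat.sub_self]
          simp
        · -- deeper-indented non-blank line: buffered, loop continues
          rw [Bool.not_eq_true] at hstop
          have hinner : innerA L base j = innerA L base (j + 1) := by
            rw [innerA]; simp [hj, hstop]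
          have hstep : stepB (cards, some (st, base, buf)) ((j : Int), L[j]) =
              (cards, some (st, base, buf ++ [L[j]])) := by
            simp [stepB, hstop]
          rw [enum_drop_cons L j hj, List.foldl_cons, hstep]
          have := ih (j + 1) (buf ++ [L[j]]) cards (by omega)
          rw [show ((j : Int) + 1) = ((j + 1 : Nat) : Int) by push_cast; ring, this, hinner]
          have hle : j + 1 ≤ innerA L base (j + 1) := le_innerA L base (j + 1)
          have htake : buf ++ [L[j]] ++ (L.drop (j + 1)).take (innerA L base (j + 1) - (j + 1)) =
              buf ++ (L.drop j).take (innerA L base (j + 1) - j) := by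
            rw [show innerA L base (j + 1) - j = (innerA L base (j + 1) - (j + 1)) + 1 by omega,
              take_drop_cons L j _ hj]
            simp
          rw [htake]
      · -- past the end: the open block is flushed after the loop
        have hj' : L.length ≤ j := by omega
        rw [innerA]
        simp [List.drop_eq_nil_of_le hj', flushB, show ¬ j < L.length from hj]

theorem main_run (L : List (List Char)) (n : Nat) :
    ∀ j cards, L.length - j ≤ n →
      outerA L j cards =
        flushB (List.foldl stepB (cards, none)
          (PySem.List.enumerate (L.drop j) (j : Int))) := by
  induction n with
  | zero =>
      intro j cards hn
      have hj : L.length ≤ j := by omega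
      rw [outerA]
      simp [List.drop_eq_nil_of_le hj, flushB, hj.not_gt]
  | succ n ih =>
      intro j cards hn
      by_cases hj : j < L.length
      · rw [outerA, enum_drop_cons L j hj]
        simp only [hj, dif_pos]
        by_cases hbl : pvBlank L[j]
        · have hstep : stepB (cards, none) ((j : Int), L[j]) = (cards, none) := by
            simp [stepB, hbl]
          rw [List.foldl_cons, hstep, if_pos hbl]
          have := ih (j + 1) cards (by omega)
          rw [show ((j : Int) + 1) = ((j + 1 : Nat) : Int) by push_cast; ring]
          exact this
        · rw [if_neg hbl, List.foldl_cons]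
          have hstep : stepB (cards, none) ((j : Int), L[j]) =
              (cards, some ((j : Int), pvIndentWidth L[j], [L[j]])) := by
            simp [stepB, hbl]
          rw [hstep]
          set base := pvIndentWidth L[j] with hbase
          set j2 := innerA L base (j + 1) with hj2
          have hle : j + 1 ≤ j2 := le_innerA L base (j + 1)
          have hrun := inner_run L base (j : Int) L.length (j + 1) [L[j]] cards (by omega)
          rw [show (((j + 1 : Nat)) : Int) = (j : Int) + 1 by push_cast; ring] at hrun
          rw [hrun, ← hj2]
          have hslice : PySem.List.slice L (some (j : Int)) (some (j2 : Int)) =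
              [L[j]] ++ (L.drop (j + 1)).take (j2 - (j + 1)) := by
            rw [PySem.List.slice_natCast,
              show j2 - j = (j2 - (j + 1)) + 1 by omega, take_drop_cons L j _ hj]
            simp
          rw [hslice]
          exact ih j2 _ (by omega)
      · have hj' : L.length ≤ j := by omega
        rw [outerA]
        simp [List.drop_eq_nil_of_le hj', flushB, show ¬ j < L.length from hj]

-- ===== VERDICT (by name: the statement is the Claim_ definition above) =====
theorem split_note_into_cards_spec : Claim_equal_split_note_into_cards := by
  intro note_text _
  unfold Spec_split_note_into_cards split_note_into_cards split_note_into_cards_alt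
  have := main_run (pvSplitlinesKeep note_text) (pvSplitlinesKeep note_text).length 0 [] (by omega)
  simpa [PySem.List.enumerate] using this
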